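-- pv_equiv track=rewrite | github.com/copperdogma/cine-forge | src/cine_forge/modules/world_building/character_bible_v1/main.py | _looks_like_derivative_noise
-- ===== SOURCE A (Python) =====
-- def _looks_like_derivative_noise(name: str, base_tokens: set[str]) -> bool:
--     for token in name.split():
--         for base in base_tokens:
--             if token == base:
--                 continue
--             if token.startswith(base) and len(token) >= len(base) + 3:
--                 return True
--     return False
-- ===== SOURCE B (Python) =====
-- def _looks_like_derivative_noise(name: str, base_tokens: set[str]) -> bool:
--     # A base matches a token iff it is a prefix of the token leaving >= 3 extra
--     # chars; only prefix lengths that actually occur among the bases can match.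
--     base_lens = {len(b) for b in base_tokens}
--     for token in name.split():
--         limit = len(token) - 3
--         for L in base_lens:
--             if L <= limit and token[:L] in base_tokens:
--                 return True
--     return False
-- ===== Notes on version B (the rewrite author's own statement) =====
-- stated objective: alternative
-- what changed: Instead of scanning every base token and calling startswith(token, base) on each, B precomputes the set of base-token lengths and, per token, tests each candidate prefix token[:L] for set membership, replacing the per-base startswith scan with one hash lookup per distinct base length.
import Mathlib
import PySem

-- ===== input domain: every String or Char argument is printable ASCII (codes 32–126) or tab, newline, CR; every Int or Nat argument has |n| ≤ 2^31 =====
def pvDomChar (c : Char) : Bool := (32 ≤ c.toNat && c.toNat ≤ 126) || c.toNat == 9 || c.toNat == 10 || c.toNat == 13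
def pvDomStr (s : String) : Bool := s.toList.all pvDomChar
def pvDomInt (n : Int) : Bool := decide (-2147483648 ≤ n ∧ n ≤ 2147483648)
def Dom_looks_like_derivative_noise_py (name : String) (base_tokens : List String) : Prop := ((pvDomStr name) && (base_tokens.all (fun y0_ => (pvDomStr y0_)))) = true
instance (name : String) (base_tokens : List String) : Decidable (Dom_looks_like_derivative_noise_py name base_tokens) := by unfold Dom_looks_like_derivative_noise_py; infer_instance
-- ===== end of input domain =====

-- B replaces A's inner startswith-scan over base tokens by a membership test of the
-- candidate prefixes token[:L], for the lengths L occurring among the bases ("alternative").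

-- ===== PORT A =====
-- inner loop: 'for base in base_tokens: …'
def pvAInner (token : String) : List String → Bool
  | [] => false
  | base :: rest =>
    if token == base then pvAInner token rest            -- 'continue'
    else if PySem.Str.startswith token base
            && decide (PySem.Str.len token ≥ PySem.Str.len base + 3) then true
    else pvAInner token rest

-- outer loop: 'for token in name.split(): …'
def pvAOuter (base_tokens : List String) : List String → Bool
  | [] => false
  | token :: rest =>
    if pvAInner token base_tokens then true else pvAOuter base_tokens rest

def looks_like_derivative_noise_py (name : String) (base_tokens : List String) : Bool :=
  pvAOuter base_tokens (PySem.Str.split₀ name)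

-- ===== PORT B =====
-- inner loop: 'for L in base_lens: if L <= limit and token[:L] in base_tokens: return True'
def pvBInner (token : String) (base_lens : List Int) (base_tokens : List String) : Bool :=
  base_lens.any
    (fun L => decide (L ≤ PySem.Str.len token - 3)
      && base_tokens.contains (PySem.Str.slice token none (some L)))

-- outer loop: 'for token in name.split(): …'
def pvBOuter (base_lens : List Int) (base_tokens : List String) : List String → Bool
  | [] => false
  | token :: rest =>
    if pvBInner token base_lens base_tokens then true
    else pvBOuter base_lens base_tokens rest

-- 'base_lens = {len(b) for b in base_tokens}' then the token loop
def looks_like_derivative_noise_py_alt (name : String) (base_tokens : List String) : Bool :=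
  pvBOuter (PySem.Set.ofList (base_tokens.map (fun b => PySem.Str.len b))) base_tokens
    (PySem.Str.split₀ name)

-- ===== PRECONDITION & SPEC =====
def Spec_looks_like_derivative_noise_py (name : String) (base_tokens : List String) (out : Bool) : Prop := out = looks_like_derivative_noise_py_alt name base_tokens
instance (name : String) (base_tokens : List String) (out : Bool) : Decidable (Spec_looks_like_derivative_noise_py name base_tokens out) := by unfold Spec_looks_like_derivative_noise_py; infer_instance

-- ===== CLAIM (what is proved, stated in full; the proofs are below) =====
def Claim_equal_looks_like_derivative_noise_py : Prop := ∀ (name : String) (base_tokens : List String), Dom_looks_like_derivative_noise_py name base_tokens → Spec_looks_like_derivative_noise_py name base_tokens (looks_like_derivative_noise_py name base_tokens)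

-- ===== LEMMAS AND PROOFS =====

lemma pvAInner_iff (token : String) (bts : List String) :
    pvAInner token bts = true ↔
      ∃ b ∈ bts, token ≠ b ∧ b.toList <+: token.toList ∧
        b.toList.length + 3 ≤ token.toList.length := by
  induction bts with
  | nil => simp [pvAInner]
  | cons b rest ih =>
    by_cases heq : token == b
    · have : token = b := by simpa using heq
      subst this
      simp only [pvAInner, heq, if_pos]
      rw [ih]
      constructor
      · rintro ⟨c, hc, h⟩; exact ⟨c, List.mem_cons_of_mem _ hc, h⟩
      · rintro ⟨c, hc, hne, h⟩
        rcases List.mem_cons.mp hc with rfl | hc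
        · exact absurd rfl hne
        · exact ⟨c, hc, hne, h⟩
    · have hne : token ≠ b := by simpa using heq
      have hbf : (token == b) = false := beq_eq_false_iff_ne.mpr hne
      simp only [pvAInner, hbf, Bool.false_eq_true, if_false]
      by_cases hmatch : PySem.Str.startswith token b = true ∧
          b.toList.length + 3 ≤ token.toList.length
      · have hsw := hmatch.1
        have hpre : b.toList <+: token.toList := by
          have := (PySem.Chars.startswith_iff token.toList b.toList).mp (by simpa using hsw)
          exact this
        have : (PySem.Str.startswith token b
            && decide (PySem.Str.len token ≥ PySem.Str.len b + 3)) = true := by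
          simp only [PySem.Str.startswith_eq, PySem.Str.len_eq, Bool.and_eq_true, decide_eq_true_eq]
          refine ⟨by simpa using hsw, ?_⟩
          have := hmatch.2; omega
        rw [this]
        simp only [if_true]
        constructor
        · intro _; exact ⟨b, List.mem_cons_self, hne, hpre, hmatch.2⟩
        · intro _; trivial
      · have : (PySem.Str.startswith token b
            && decide (PySem.Str.len token ≥ PySem.Str.len b + 3)) = false := by
          simp only [PySem.Str.startswith_eq, PySem.Str.len_eq, Bool.and_eq_false_iff]
          by_cases hsw : PySem.Chars.startswith token.toList b.toList = true
          · right
            simp only [decide_eq_false_iff_not, not_le]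
            have hlen : ¬ b.toList.length + 3 ≤ token.toList.length := fun h =>
              hmatch ⟨by simpa using hsw, h⟩
            omega
          · left; simpa using hsw
        rw [this]
        simp only [Bool.false_eq_true, if_false]
        rw [ih]
        constructor
        · rintro ⟨c, hc, h⟩; exact ⟨c, List.mem_cons_of_mem _ hc, h⟩
        · rintro ⟨c, hc, hnec, hpre, hlen⟩
          rcases List.mem_cons.mp hc with rfl | hc
          · exact absurd ⟨(PySem.Chars.startswith_iff _ _).mpr hpre, hlen⟩ hmatch
          · exact ⟨c, hc, hnec, hpre, hlen⟩

lemma pvBInner_iff (token : String) (bts : List String) :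
    pvBInner token (PySem.Set.ofList (bts.map (fun b => PySem.Str.len b))) bts = true ↔
      ∃ m : Nat, ((m : Int) ∈ bts.map (fun b => PySem.Str.len b)) ∧
        (m : Int) ≤ (token.toList.length : Int) - 3 ∧
        (String.ofList (token.toList.take m)) ∈ bts := by
  unfold pvBInner
  simp only [List.any_eq_true, PySem.Set.mem_ofList, Bool.and_eq_true, decide_eq_true_eq,
    List.contains_eq_mem, PySem.Str.len_eq]
  constructor
  · rintro ⟨L, hL, hle, hmem⟩
    obtain ⟨b0, _, rfl⟩ := List.mem_map.mp hL
    refine ⟨b0.toList.length, by simpa using hL, by simpa using hle, ?_⟩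
    have hsl : PySem.Str.slice token none (some ((b0.toList.length : Nat) : Int))
        = String.ofList (token.toList.take b0.toList.length) := by
      apply String.ext_iff.mpr; simp
    rwa [hsl] at hmem
  · rintro ⟨m, hmL, hle, hmem⟩
    refine ⟨(m : Int), by simpa using hmL, by simpa using hle, ?_⟩
    have hsl : PySem.Str.slice token none (some ((m : Nat) : Int))
        = String.ofList (token.toList.take m) := by
      apply String.ext_iff.mpr; simp
    rwa [hsl]

lemma pvInner_eq (token : String) (bts : List String) :
    pvAInner token bts
      = pvBInner token (PySem.Set.ofList (bts.map (fun b => PySem.Str.len b))) bts := by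
  rw [Bool.eq_iff_iff, pvAInner_iff, pvBInner_iff]
  constructor
  · rintro ⟨b, hb, _, hpre, hlen⟩
    refine ⟨b.toList.length, ?_, by omega, ?_⟩
    · exact List.mem_map.mpr ⟨b, hb, by simp⟩
    · have : token.toList.take b.toList.length = b.toList := by
        obtain ⟨t, ht⟩ := hpre
        rw [← ht, List.take_left]
      rw [this]
      simpa using hb
  · rintro ⟨m, _, hle, hmem⟩
    have hm3 : m + 3 ≤ token.toList.length := by omega
    refine ⟨String.ofList (token.toList.take m), hmem, ?_, ?_, ?_⟩
    · intro h
      have h2 : token.toList = token.toList.take m := by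
        conv_lhs => rw [h]
        simp
      have h3 := congrArg List.length h2
      rw [List.length_take] at h3
      omega
    · simp only [String.toList_ofList]
      exact List.take_prefix _ _
    · simp only [String.toList_ofList, List.length_take]
      omega

lemma pvOuter_eq (bts toks : List String) :
    pvAOuter bts toks
      = pvBOuter (PySem.Set.ofList (bts.map (fun b => PySem.Str.len b))) bts toks := by
  induction toks with
  | nil => rfl
  | cons t rest ih => simp only [pvAOuter, pvBOuter, pvInner_eq, ih]

-- ===== VERDICT (by name: the statement is the Claim_ definition above) =====
theorem looks_like_derivative_noise_py_spec : Claim_equal_looks_like_derivative_noise_py := by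
  intro name bts _
  unfold Spec_looks_like_derivative_noise_py looks_like_derivative_noise_py looks_like_derivative_noise_py_alt
  exact pvOuter_eq _ _
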